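-- pv_equiv track=rewrite | github.com/gopichandblr02/python_qns | Qns_GeeksForGeeks/gfg_stack_solutions.py | count_max_diff_subarrays
-- ===== SOURCE A (Python) =====
-- from typing import List, Optional
--
-- def count_max_diff_subarrays(arr: List[int]) -> int:
--     """Count distinct differences maximum for subarrays"""
--     diffs = set()
--     for i in range(len(arr)):
--         mx = arr[i]
--         for j in range(i, len(arr)):
--             mx = max(mx, arr[j])
--             diffs.add(mx - min(arr[i:j+1]))
--     return len(diffs)
-- ===== SOURCE B (Python) =====
-- from typing import List, Optional
--
-- def count_max_diff_subarrays(arr: List[int]) -> int: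
--     """Count distinct differences maximum for subarrays"""
--     diffs = set()
--     for i in range(len(arr)):
--         mn = mx = arr[i]
--         diffs.add(0)
--         for v in arr[i + 1:]:
--             if v > mx:
--                 mx = v
--             elif v < mn:
--                 mn = v
--             diffs.add(mx - mn)
--     return len(diffs)
-- ===== Notes on version B (the rewrite author's own statement) =====
-- stated objective: faster
-- what changed: B tracks a running minimum alongside the running maximum while iterating over the values of each suffix, instead of re-scanning the slice arr[i:j+1] with min() at every step, removing the inner O(n) scan.
import Mathlib
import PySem

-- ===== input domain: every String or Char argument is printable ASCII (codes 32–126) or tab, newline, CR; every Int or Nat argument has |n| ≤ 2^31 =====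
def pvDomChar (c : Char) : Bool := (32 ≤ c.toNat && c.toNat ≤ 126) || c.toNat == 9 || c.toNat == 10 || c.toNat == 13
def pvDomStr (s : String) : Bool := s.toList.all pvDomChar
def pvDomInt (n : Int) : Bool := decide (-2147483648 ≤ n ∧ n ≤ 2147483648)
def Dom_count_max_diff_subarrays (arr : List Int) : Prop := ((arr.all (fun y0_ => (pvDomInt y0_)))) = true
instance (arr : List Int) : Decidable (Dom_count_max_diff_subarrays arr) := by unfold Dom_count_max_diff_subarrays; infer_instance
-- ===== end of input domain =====

-- B replaces A's O(n)-per-step min(arr[i:j+1]) re-scan by a running minimum kept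
-- alongside the running maximum while walking each suffix (objective: faster, O(n^3) → O(n^2)).

-- ===== PORT A =====
-- inner-loop step: mx = max(mx, arr[j]); diffs.add(mx - min(arr[i:j+1]))
def pvStepA (arr : List Int) (i : Int) (s : Int × PySem.Set Int) (j : Int) : Int × PySem.Set Int :=
  let mx := max s.1 (PySem.List.pyGetD arr j 0)
  (mx, PySem.Set.add s.2
    (mx - ((PySem.List.min? (PySem.List.slice arr (some i) (some (j + 1))) (fun y => y)).getD 0)))

-- outer-loop body: mx = arr[i]; for j in range(i, len(arr)): …
def pvBodyA (arr : List Int) (diffs : PySem.Set Int) (i : Int) : PySem.Set Int :=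
  ((PySem.List.pyRange i (arr.length : Int) 1).foldl (pvStepA arr i)
    (PySem.List.pyGetD arr i 0, diffs)).2

def count_max_diff_subarrays (arr : List Int) : Int :=
  PySem.Set.len ((PySem.List.pyRange 0 (arr.length : Int) 1).foldl (pvBodyA arr) PySem.Set.empty)

-- ===== PORT B =====
-- inner-loop step of Source B: if v > mx: mx = v; elif v < mn: mn = v; diffs.add(mx - mn)
def pvStepB (s : Int × Int × PySem.Set Int) (v : Int) : Int × Int × PySem.Set Int :=
  if v > s.2.1 then (s.1, v, PySem.Set.add s.2.2 (v - s.1))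
  else if v < s.1 then (v, s.2.1, PySem.Set.add s.2.2 (s.2.1 - v))
  else (s.1, s.2.1, PySem.Set.add s.2.2 (s.2.1 - s.1))

-- outer-loop body of Source B: mn = mx = arr[i]; diffs.add(0); for v in arr[i+1:]: …
def pvBodyB (arr : List Int) (diffs : PySem.Set Int) (i : Int) : PySem.Set Int :=
  ((PySem.List.slice arr (some (i + 1)) none).foldl pvStepB
    (PySem.List.pyGetD arr i 0, PySem.List.pyGetD arr i 0, PySem.Set.add diffs 0)).2.2

def count_max_diff_subarrays_alt (arr : List Int) : Int :=
  PySem.Set.len ((PySem.List.pyRange 0 (arr.length : Int) 1).foldl (pvBodyB arr) PySem.Set.empty)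

-- ===== PRECONDITION & SPEC =====
def Spec_count_max_diff_subarrays (arr : List Int) (out : Int) : Prop := out = count_max_diff_subarrays_alt arr
instance (arr : List Int) (out : Int) : Decidable (Spec_count_max_diff_subarrays arr out) := by unfold Spec_count_max_diff_subarrays; infer_instance

-- ===== CLAIM (what is proved, stated in full; the proofs are below) =====
def Claim_equal_count_max_diff_subarrays : Prop := ∀ (arr : List Int), Dom_count_max_diff_subarrays arr → Spec_count_max_diff_subarrays arr (count_max_diff_subarrays arr)

-- ===== LEMMAS AND PROOFS =====

-- the (max − min) values B's inner loop emits, as a recursion on the remaining suffix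
def pvDiffs (mn mx : Int) : List Int → List Int
  | [] => []
  | v :: t => (max mx v - min mn v) :: pvDiffs (min mn v) (max mx v) t

lemma pvPyRange_self (a : Int) : PySem.List.pyRange a a 1 = [] := by
  apply List.eq_nil_iff_forall_not_mem.mpr
  intro x hx
  rw [PySem.List.mem_pyRange_one] at hx
  omega

lemma pvGetD_eq (arr : List Int) (i : Nat) (x : Int) (t : List Int)
    (h : arr.drop i = x :: t) (k : Nat) :
    PySem.List.pyGetD arr (((i + k : Nat) : Int)) 0 = (x :: t).getD k 0 := by
  rw [PySem.List.pyGetD_natCast, List.getD_eq_getElem?_getD, List.getD_eq_getElem?_getD,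
    ← h, List.getElem?_drop]

lemma pvUpdate_cons {d : PySem.Set Int} {a : Int} {l : List Int} :
    PySem.Set.update d (a :: l) = PySem.Set.update (PySem.Set.add d a) l := by
  simp [PySem.Set.update]

lemma pvUpdate_append {d : PySem.Set Int} {l₁ l₂ : List Int} :
    PySem.Set.update d (l₁ ++ l₂) = PySem.Set.update (PySem.Set.update d l₁) l₂ := by
  simp [PySem.Set.update]

-- A's inner loop, characterised: running max, and the emitted window differences
lemma pvA_inner (arr : List Int) (i : Nat) (x : Int) (t : List Int)
    (h : arr.drop i = x :: t) :
    ∀ k, k ≤ t.length → ∀ d : PySem.Set Int,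
    (PySem.List.pyRange (i : Int) ((i + k + 1 : Nat) : Int) 1).foldl (pvStepA arr i)
      (PySem.List.pyGetD arr (i : Int) 0, d)
    = ((t.take k).foldl max x,
       PySem.Set.update d ((List.range (k + 1)).map
         (fun m => (t.take m).foldl max x - (t.take m).foldl min x))) := by
  have hx : PySem.List.pyGetD arr (i : Int) 0 = x := by
    have := pvGetD_eq arr i x t h 0
    simpa using this
  intro k
  induction k with
  | zero =>
    intro _ d
    have h1 : ((i + 0 + 1 : Nat) : Int) = (i : Int) + 1 := by push_cast; ring
    rw [h1, PySem.List.pyRange_one_succ_right le_rfl, pvPyRange_self]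
    have hsl : PySem.List.slice arr (some (i : Int)) (some ((i : Int) + 1)) = [x] := by
      have h2 : ((i : Int) + 1) = (i : Int) + ((1 : Nat) : Int) := by push_cast; ring
      rw [h2, PySem.List.slice_natCast_add, h]
      rfl
    simp [pvStepA, hx, hsl, PySem.List.min?_id_cons, PySem.Set.update]
  | succ k ih =>
    intro hk d
    have hk' : k ≤ t.length := by omega
    have hkl : k < t.length := by omega
    have h1 : ((i + (k + 1) + 1 : Nat) : Int) = ((i + k + 1 : Nat) : Int) + 1 := by push_cast; ring
    have h2 : (i : Int) ≤ ((i + k + 1 : Nat) : Int) := by push_cast; omega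
    rw [h1, PySem.List.pyRange_one_succ_right h2, List.foldl_append, ih hk' d]
    -- the new element arr[i+k+1] is t[k]
    have hget : PySem.List.pyGetD arr (((i + k + 1 : Nat) : Int)) 0 = t[k] := by
      have h3 : (i + k + 1 : Nat) = i + (k + 1) := by omega
      rw [h3, pvGetD_eq arr i x t h (k + 1)]
      simp [List.getD_eq_getElem?_getD, List.getElem?_eq_getElem hkl]
    -- the new slice arr[i : i+k+2] is x :: t.take (k+1)
    have hsl : PySem.List.slice arr (some (i : Int)) (some (((i + k + 1 : Nat) : Int) + 1))
        = x :: t.take (k + 1) := by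
      have h4 : (((i + k + 1 : Nat) : Int) + 1) = (i : Int) + ((k + 2 : Nat) : Int) := by
        push_cast; ring
      rw [h4, PySem.List.slice_natCast_add, h]
      rfl
    have htake : t.take (k + 1) = t.take k ++ [t[k]] := by
      rw [List.take_add_one, List.getElem?_eq_getElem hkl]
      rfl
    have hmax : (t.take (k + 1)).foldl max x = max ((t.take k).foldl max x) t[k] := by
      rw [htake, List.foldl_append]
      rfl
    simp only [List.foldl_cons, List.foldl_nil, pvStepA, hget, hsl,
      PySem.List.min?_id_cons, Option.getD_some]
    rw [show List.range (k + 1 + 1) = List.range (k + 1) ++ [k + 1] from List.range_succ,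
      List.map_append, pvUpdate_append]
    simp [hmax, PySem.Set.update]

-- B's inner step, in closed form (needs the loop invariant mn ≤ mx)
lemma pvB_step (mn mx : Int) (hle : mn ≤ mx) (d : PySem.Set Int) (v : Int) :
    pvStepB (mn, mx, d) v = (min mn v, max mx v, PySem.Set.add d (max mx v - min mn v)) := by
  dsimp only [pvStepB]
  split_ifs with h1 h2
  · rw [min_eq_left (by omega : mn ≤ v), max_eq_right (by omega : mx ≤ v)]
  · rw [min_eq_right (by omega : v ≤ mn), max_eq_left (by omega : v ≤ mx)]
  · rw [min_eq_left (by omega : mn ≤ v), max_eq_left (by omega : v ≤ mx)]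

-- B's inner loop, characterised
lemma pvB_inner (t : List Int) : ∀ (mn mx : Int), mn ≤ mx → ∀ d : PySem.Set Int,
    t.foldl pvStepB (mn, mx, d)
    = (t.foldl min mn, t.foldl max mx, PySem.Set.update d (pvDiffs mn mx t)) := by
  induction t with
  | nil => intro mn mx _ d; simp [pvDiffs, PySem.Set.update]
  | cons v t ih =>
    intro mn mx hle d
    have hle' : min mn v ≤ max mx v :=
      le_trans (min_le_left _ _) (le_trans hle (le_max_left _ _))
    simp only [List.foldl_cons, pvB_step mn mx hle d v, ih (min mn v) (max mx v) hle',
      pvDiffs, pvUpdate_cons]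

-- B's emitted values are the per-window (max − min) differences
lemma pvDiffs_map (t : List Int) : ∀ mn mx : Int,
    pvDiffs mn mx t = (List.range t.length).map
      (fun m => (t.take (m + 1)).foldl max mx - (t.take (m + 1)).foldl min mn) := by
  induction t with
  | nil => intro mn mx; simp [pvDiffs]
  | cons v t ih =>
    intro mn mx
    simp only [pvDiffs, List.length_cons, List.range_succ_eq_map, List.map_cons, List.map_map]
    refine congrArg₂ List.cons (by simp) ?_
    rw [ih (min mn v) (max mx v)]
    apply List.map_congr_left
    intro m _
    simp [Function.comp]

-- the two outer-loop bodies agree on every index the outer range produces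
lemma pvBody_eq (arr : List Int) : ∀ (d : PySem.Set Int) (i : Int),
    i ∈ PySem.List.pyRange 0 (arr.length : Int) 1 → pvBodyA arr d i = pvBodyB arr d i := by
  intro d i hi
  rw [PySem.List.mem_pyRange_one] at hi
  obtain ⟨m, rfl⟩ : ∃ m : Nat, i = (m : Int) := ⟨i.toNat, (Int.toNat_of_nonneg hi.1).symm⟩
  have hm : m < arr.length := by exact_mod_cast hi.2
  obtain ⟨x, t, h⟩ : ∃ x t, arr.drop m = x :: t := by
    cases hd : arr.drop m with
    | nil => exact absurd (List.drop_eq_nil_iff.mp hd) (by omega)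
    | cons x t => exact ⟨x, t, rfl⟩
  have hlen : arr.length = m + t.length + 1 := by
    have := congrArg List.length h
    simp [List.length_drop] at this
    omega
  have hx : PySem.List.pyGetD arr (m : Int) 0 = x := by
    have := pvGetD_eq arr m x t h 0
    simpa using this
  have h7 : arr.drop (m + 1) = t := by
    have h8 := congrArg List.tail h
    rw [List.tail_drop] at h8
    simpa using h8
  have hsl : PySem.List.slice arr (some ((m : Int) + 1)) none = t := by
    have h5 : ((m : Int) + 1) = ((m + 1 : Nat) : Int) := by push_cast; ring
    rw [h5, PySem.List.slice_from arr (by positivity)]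
    have h6 : ((m + 1 : Nat) : Int).toNat = m + 1 := by omega
    rw [h6, h7]
  unfold pvBodyA pvBodyB
  rw [show ((arr.length : Nat) : Int) = ((m + t.length + 1 : Nat) : Int) from by rw [← hlen]]
  rw [pvA_inner arr m x t h t.length le_rfl d, hx, hsl,
    pvB_inner t x x le_rfl (PySem.Set.add d 0)]
  dsimp only
  rw [pvDiffs_map t x x, ← pvUpdate_cons]
  congr 1
  rw [List.range_succ_eq_map, List.map_cons, List.map_map]
  refine congrArg₂ List.cons (by simp) ?_
  apply List.map_congr_left
  intro m _
  simp [Function.comp]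

-- ===== VERDICT (by name: the statement is the Claim_ definition above) =====
theorem count_max_diff_subarrays_spec : Claim_equal_count_max_diff_subarrays := by
  intro arr _
  unfold Spec_count_max_diff_subarrays count_max_diff_subarrays count_max_diff_subarrays_alt
  rw [PySem.List.foldl_congr_mem _ (pvBodyA arr) (pvBodyB arr) PySem.Set.empty (pvBody_eq arr)]
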